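-- pv_equiv track=rewrite | github.com/energycenterlab/CIM_wizard | app/calculators/building_geo_calculator.py | _classify_building_usage_from_osm
-- ===== SOURCE A (Python) =====
-- from typing import Optional, Dict, Any, List
--
-- def _classify_building_usage_from_osm(osm_tags: Dict[str, Any]) -> str:
--     """Classify building usage based on OSM tags - designed for Turin's mixed-use patterns"""
--
--     # PURELY NON-RESIDENTIAL buildings (exclude these from residential consideration)
--     non_residential_indicators = {
--         # Institutional/Public buildings
--         'amenity': ['school', 'university', 'college', 'hospital', 'clinic', 'church',
--                    'place_of_worship', 'fire_station', 'police', 'post_office', 'townhall',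
--                    'library', 'community_centre', 'social_facility'],
--
--         # Large commercial/industrial
--         'building': ['industrial', 'warehouse', 'factory', 'commercial', 'retail',
--                     'supermarket', 'school', 'hospital', 'church', 'mosque', 'synagogue',
--                     'university', 'college', 'public', 'civic'],
--
--         # Infrastructure
--         'man_made': ['water_tower', 'pumping_station', 'reservoir_covered'],
--         'power': ['substation', 'generator'],
--         'railway': ['station'],
--         'aeroway': ['terminal'],
--
--         # Tourism (hotels/hostels are typically not residential)
--         'tourism': ['hotel', 'motel', 'hostel'],
--
--         # Healthcare facilities
--         'healthcare': ['hospital', 'clinic', 'nursing_home'],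
--
--         # Large sports/leisure facilities
--         'leisure': ['sports_centre', 'stadium', 'swimming_pool']
--     }
--
--     # Check for purely non-residential indicators
--     for tag_key, excluded_values in non_residential_indicators.items():
--         if tag_key in osm_tags:
--             tag_value = str(osm_tags[tag_key]).lower()
--             if tag_value in excluded_values:
--                 return 'not_residential_based_on_osm'
--
--     # MIXED-USE INDICATORS (keep as potentially residential)
--     # These are common in Turin and should NOT be filtered out
--     mixed_use_indicators = {
--         'shop': True,  # Ground floor shops with apartments above
--         'office': True,  # Offices with potential residential above
--         'craft': True,  # Small workshops with residential
--         'amenity': ['restaurant', 'cafe', 'bar', 'fast_food', 'pharmacy', 'bank', 'atm']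
--     }
--
--     # Check for mixed-use indicators
--     has_mixed_use = False
--     for tag_key, values in mixed_use_indicators.items():
--         if tag_key in osm_tags:
--             if values is True or str(osm_tags[tag_key]).lower() in values:
--                 has_mixed_use = True
--                 break
--
--     # RESIDENTIAL INDICATORS
--     residential_indicators = {
--         'building': ['residential', 'apartments', 'house', 'detached', 'semidetached',
--                     'terrace', 'bungalow', 'static_caravan', 'yes'],
--         'building:use': ['residential'],
--         'residential': True,
--     }
--
--     # Check for explicit residential indicators
--     for tag_key, values in residential_indicators.items():
--         if tag_key in osm_tags:
--             tag_value = str(osm_tags[tag_key]).lower()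
--             if values is True or tag_value in values:
--                 if has_mixed_use:
--                     return 'probably_residential_complex'  # Mixed-use but likely residential
--                 else:
--                     return 'probably_residential_complex'  # Pure residential
--
--     # If no specific indicators found but has mixed-use, assume residential potential
--     if has_mixed_use:
--         return 'probably_residential_complex'
--
--     # Default: likely residential if it's just a generic building
--     building_type = osm_tags.get('building', '').lower()
--     if building_type in ['yes', '', 'building']:
--         return 'probably_residential_complex'
--
--     # Unknown/ambiguous cases - keep as potentially residential
--     return 'probably_residential_complex'
-- ===== SOURCE B (Python) =====
-- from typing import Optional, Dict, Any, List
--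
-- _NON_RESIDENTIAL = {
--     'amenity': ['school', 'university', 'college', 'hospital', 'clinic', 'church',
--                'place_of_worship', 'fire_station', 'police', 'post_office', 'townhall',
--                'library', 'community_centre', 'social_facility'],
--     'building': ['industrial', 'warehouse', 'factory', 'commercial', 'retail',
--                 'supermarket', 'school', 'hospital', 'church', 'mosque', 'synagogue',
--                 'university', 'college', 'public', 'civic'],
--     'man_made': ['water_tower', 'pumping_station', 'reservoir_covered'],
--     'power': ['substation', 'generator'],
--     'railway': ['station'],
--     'aeroway': ['terminal'],
--     'tourism': ['hotel', 'motel', 'hostel'],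
--     'healthcare': ['hospital', 'clinic', 'nursing_home'],
--     'leisure': ['sports_centre', 'stadium', 'swimming_pool'],
-- }
--
-- # Hash index built once: the set of (tag key, forbidden lowered value) pairs.
-- _FORBIDDEN_PAIRS = frozenset(
--     (key, value) for key, values in _NON_RESIDENTIAL.items() for value in values
-- )
--
--
-- def _classify_building_usage_from_osm(osm_tags: Dict[str, Any]) -> str:
--     """Classify building usage based on OSM tags.
--
--     Single pass over the building's own tags: a tag marks the building
--     non-residential iff its (key, lowered value) pair is in the precomputed
--     set; every other outcome of the original classification is the same
--     'probably_residential_complex' value."""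
--     for key, value in osm_tags.items():
--         if (key, str(value).lower()) in _FORBIDDEN_PAIRS:
--             return 'not_residential_based_on_osm'
--     return 'probably_residential_complex'
-- ===== Notes on version B (the rewrite author's own statement) =====
-- stated objective: alternative
-- what changed: B inverts the traversal: instead of A's scan over the constant indicator table with a dict lookup per row (followed by three further passes that all return the same string), B makes one pass over the building's own tags and tests each (key, lowered value) pair against a frozenset of forbidden pairs built once at import time.
import Mathlib
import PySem

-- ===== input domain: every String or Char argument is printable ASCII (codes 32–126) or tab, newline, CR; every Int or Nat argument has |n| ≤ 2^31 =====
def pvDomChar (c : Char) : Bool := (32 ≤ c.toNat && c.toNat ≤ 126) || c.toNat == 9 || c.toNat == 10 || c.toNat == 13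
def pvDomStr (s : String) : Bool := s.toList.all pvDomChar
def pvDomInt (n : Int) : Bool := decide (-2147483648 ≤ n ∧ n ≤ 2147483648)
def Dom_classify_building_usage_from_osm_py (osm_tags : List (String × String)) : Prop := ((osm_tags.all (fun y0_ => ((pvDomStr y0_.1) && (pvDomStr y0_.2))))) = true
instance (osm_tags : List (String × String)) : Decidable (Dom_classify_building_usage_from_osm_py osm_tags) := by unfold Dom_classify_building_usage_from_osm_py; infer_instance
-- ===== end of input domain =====

-- B inverts the traversal: A scans the constant indicator table (with a dict lookup per
-- row, then three further passes that all return the same string); B makes one pass over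
-- the building's own tags, testing each (key, lowered value) pair against a precomputed
-- set of forbidden pairs.

-- ===== PORT A =====
def pvNonResTable : List (String × List String) := [
  ("amenity", ["school", "university", "college", "hospital", "clinic", "church",
    "place_of_worship", "fire_station", "police", "post_office", "townhall",
    "library", "community_centre", "social_facility"]),
  ("building", ["industrial", "warehouse", "factory", "commercial", "retail",
    "supermarket", "school", "hospital", "church", "mosque", "synagogue",
    "university", "college", "public", "civic"]),
  ("man_made", ["water_tower", "pumping_station", "reservoir_covered"]),
  ("power", ["substation", "generator"]),
  ("railway", ["station"]),
  ("aeroway", ["terminal"]),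
  ("tourism", ["hotel", "motel", "hostel"]),
  ("healthcare", ["hospital", "clinic", "nursing_home"]),
  ("leisure", ["sports_centre", "stadium", "swimming_pool"])]

-- Python's heterogeneous dict values: `True` ↦ none, a list ↦ some list.
def pvMixedTable : List (String × Option (List String)) := [
  ("shop", none), ("office", none), ("craft", none),
  ("amenity", some ["restaurant", "cafe", "bar", "fast_food", "pharmacy", "bank", "atm"])]

def pvResTable : List (String × Option (List String)) := [
  ("building", some ["residential", "apartments", "house", "detached", "semidetached",
    "terrace", "bungalow", "static_caravan", "yes"]),
  ("building:use", some ["residential"]),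
  ("residential", none)]

-- the mixed-use loop computing has_mixed_use (break ↦ return true)
def pvMixedLoop (osm : List (String × String)) : List (String × Option (List String)) → Bool
  | [] => false
  | (k, vals) :: rest =>
    match PySem.Dict.get? (PySem.Dict.mk osm) k with          -- `tag_key in osm_tags` + lookup
    | some v =>
      match vals with
      | none => true                           -- `values is True`
      | some vs => if PySem.Str.lower v ∈ vs then true else pvMixedLoop osm rest
    | none => pvMixedLoop osm rest

-- the default tail after the residential loop
def pvDefaultA (osm : List (String × String)) : String :=
  let building_type := PySem.Str.lower (PySem.Dict.getD (PySem.Dict.mk osm) "building" "")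
  if building_type ∈ ["yes", "", "building"] then "probably_residential_complex"
  else "probably_residential_complex"

-- the residential loop; falls through to the has_mixed_use check and the default
def pvResLoop (osm : List (String × String)) (has_mixed : Bool) :
    List (String × Option (List String)) → String
  | [] => if has_mixed then "probably_residential_complex" else pvDefaultA osm
  | (k, vals) :: rest =>
    match PySem.Dict.get? (PySem.Dict.mk osm) k with
    | some v =>
      let tag_value := PySem.Str.lower v
      match vals with
      | none =>
        if has_mixed then "probably_residential_complex" else "probably_residential_complex"
      | some vs =>
        if tag_value ∈ vs then
          (if has_mixed then "probably_residential_complex" else "probably_residential_complex")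
        else pvResLoop osm has_mixed rest
    | none => pvResLoop osm has_mixed rest

-- the non-residential guard loop; falls through to the rest of the function
def pvNonResLoop (osm : List (String × String)) : List (String × List String) → String
  | [] => pvResLoop osm (pvMixedLoop osm pvMixedTable) pvResTable
  | (k, vals) :: rest =>
    match PySem.Dict.get? (PySem.Dict.mk osm) k with
    | some v =>
      if PySem.Str.lower v ∈ vals then "not_residential_based_on_osm"
      else pvNonResLoop osm rest
    | none => pvNonResLoop osm rest

def classify_building_usage_from_osm_py (osm_tags : List (String × String)) : String :=
  pvNonResLoop osm_tags pvNonResTable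

-- ===== PORT B =====
def pvNonResidentialB : List (String × List String) := [
  ("amenity", ["school", "university", "college", "hospital", "clinic", "church",
    "place_of_worship", "fire_station", "police", "post_office", "townhall",
    "library", "community_centre", "social_facility"]),
  ("building", ["industrial", "warehouse", "factory", "commercial", "retail",
    "supermarket", "school", "hospital", "church", "mosque", "synagogue",
    "university", "college", "public", "civic"]),
  ("man_made", ["water_tower", "pumping_station", "reservoir_covered"]),
  ("power", ["substation", "generator"]),
  ("railway", ["station"]),
  ("aeroway", ["terminal"]),
  ("tourism", ["hotel", "motel", "hostel"]),
  ("healthcare", ["hospital", "clinic", "nursing_home"]),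
  ("leisure", ["sports_centre", "stadium", "swimming_pool"])]

-- the frozenset of (key, forbidden value) pairs, built once in Source B
def pvForbiddenPairs : PySem.Set (String × String) :=
  PySem.Set.ofList (pvNonResidentialB.flatMap (fun kv => kv.2.map (fun v => (kv.1, v))))

-- `for key, value in osm_tags.items()`: the association list represents the dict under
-- the first-match convention, so the items loop visits each key once, at its first
-- occurrence — `seen` records the keys already visited.
def pvItemsLoopB (seen : List String) : List (String × String) → String
  | [] => "probably_residential_complex"
  | (k, v) :: rest =>
    if k ∈ seen then pvItemsLoopB seen rest
    else if (k, PySem.Str.lower v) ∈ pvForbiddenPairs then "not_residential_based_on_osm"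
    else pvItemsLoopB (k :: seen) rest

def classify_building_usage_from_osm_py_alt (osm_tags : List (String × String)) : String :=
  pvItemsLoopB [] osm_tags

-- ===== PRECONDITION & SPEC =====
def Spec_classify_building_usage_from_osm_py (osm_tags : List (String × String)) (out : String) : Prop := out = classify_building_usage_from_osm_py_alt osm_tags
instance (osm_tags : List (String × String)) (out : String) : Decidable (Spec_classify_building_usage_from_osm_py osm_tags out) := by unfold Spec_classify_building_usage_from_osm_py; infer_instance

-- ===== CLAIM (what is proved, stated in full; the proofs are below) =====
def Claim_equal_classify_building_usage_from_osm_py : Prop := ∀ (osm_tags : List (String × String)), Dom_classify_building_usage_from_osm_py osm_tags → Spec_classify_building_usage_from_osm_py osm_tags (classify_building_usage_from_osm_py osm_tags)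

-- ===== LEMMAS AND PROOFS =====

theorem pvDefaultA_const (osm : List (String × String)) :
    pvDefaultA osm = "probably_residential_complex" := by
  simp [pvDefaultA]

theorem pvResLoop_const (osm : List (String × String)) (b : Bool)
    (t : List (String × Option (List String))) :
    pvResLoop osm b t = "probably_residential_complex" := by
  induction t with
  | nil => cases b <;> simp [pvResLoop, pvDefaultA_const]
  | cons kv rest ih =>
    obtain ⟨k, vals⟩ := kv
    cases h : PySem.Dict.get? (PySem.Dict.mk osm) k with
    | none => simpa only [pvResLoop, h] using ih
    | some v =>
      cases vals with
      | none => simp [pvResLoop, h]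
      | some vs => simp [pvResLoop, h, ih]

-- A returns the non-residential label iff some key of the dict maps (after lowering) to a
-- forbidden pair — stated through the first-match lookup get?.
theorem pvNonResLoop_iff (osm : List (String × String)) (t : List (String × List String)) :
    pvNonResLoop osm t = "not_residential_based_on_osm" ↔
      ∃ k v, PySem.Dict.get? (PySem.Dict.mk osm) k = some v ∧
        ∃ kv ∈ t, kv.1 = k ∧ PySem.Str.lower v ∈ kv.2 := by
  induction t with
  | nil =>
    simp [pvNonResLoop, pvResLoop_const]
  | cons kv rest ih =>
    obtain ⟨k0, vals⟩ := kv
    cases h : PySem.Dict.get? (PySem.Dict.mk osm) k0 with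
    | none =>
      simp only [pvNonResLoop, h, ih]
      constructor
      · rintro ⟨k, v, hk, kv', hmem, rfl, hv⟩
        exact ⟨kv'.1, v, hk, kv', List.mem_cons_of_mem _ hmem, rfl, hv⟩
      · rintro ⟨k, v, hk, kv', hmem, rfl, hv⟩
        rcases List.mem_cons.1 hmem with rfl | hmem'
        · simp [h] at hk
        · exact ⟨kv'.1, v, hk, kv', hmem', rfl, hv⟩
    | some v0 =>
      by_cases hv0 : PySem.Str.lower v0 ∈ vals
      · simp only [pvNonResLoop, h, if_pos hv0]
        constructor
        · intro _
          exact ⟨k0, v0, h, (k0, vals), List.mem_cons_self, rfl, hv0⟩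
        · intro _; trivial
      · simp only [pvNonResLoop, h, if_neg hv0, ih]
        constructor
        · rintro ⟨k, v, hk, kv', hmem, rfl, hv⟩
          exact ⟨kv'.1, v, hk, kv', List.mem_cons_of_mem _ hmem, rfl, hv⟩
        · rintro ⟨k, v, hk, kv', hmem, rfl, hv⟩
          rcases List.mem_cons.1 hmem with hEq | hmem'
          · exfalso
            subst hEq
            have hk' : PySem.Dict.get? (PySem.Dict.mk osm) k0 = some v := hk
            rw [h] at hk'
            cases hk'
            exact hv0 hv
          · exact ⟨kv'.1, v, hk, kv', hmem', rfl, hv⟩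

-- B's loop returns the two labels only
theorem pvItemsLoopB_cases (l : List (String × String)) (seen : List String) :
    pvItemsLoopB seen l = "not_residential_based_on_osm" ∨
    pvItemsLoopB seen l = "probably_residential_complex" := by
  induction l generalizing seen with
  | nil => right; rfl
  | cons p rest ih =>
    obtain ⟨k, v⟩ := p
    by_cases hs : k ∈ seen
    · simpa only [pvItemsLoopB, if_pos hs] using ih seen
    · by_cases hf : (k, PySem.Str.lower v) ∈ pvForbiddenPairs
      · left; simp [pvItemsLoopB, hs, hf]
      · simpa only [pvItemsLoopB, if_neg hs, if_neg hf] using ih (k :: seen)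

-- B returns the non-residential label iff some unseen key's first-match value forms a
-- forbidden pair
theorem pvItemsLoopB_iff (l : List (String × String)) (seen : List String) :
    pvItemsLoopB seen l = "not_residential_based_on_osm" ↔
      ∃ k v, k ∉ seen ∧ PySem.Dict.get? (PySem.Dict.mk l) k = some v ∧
        (k, PySem.Str.lower v) ∈ pvForbiddenPairs := by
  induction l generalizing seen with
  | nil =>
    simp [pvItemsLoopB, PySem.Dict.get?]
  | cons p rest ih =>
    obtain ⟨k0, v0⟩ := p
    by_cases hs : k0 ∈ seen
    · simp only [pvItemsLoopB, if_pos hs, ih]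
      constructor
      · rintro ⟨k, v, hk, hget, hf⟩
        refine ⟨k, v, hk, ?_, hf⟩
        rw [PySem.Dict.get?_mk_cons]
        have : k0 ≠ k := fun hEq => hk (hEq ▸ hs)
        simp [this, hget]
      · rintro ⟨k, v, hk, hget, hf⟩
        have hne : k0 ≠ k := fun hEq => hk (hEq ▸ hs)
        rw [PySem.Dict.get?_mk_cons] at hget
        simp [hne] at hget
        exact ⟨k, v, hk, hget, hf⟩
    · by_cases hf0 : (k0, PySem.Str.lower v0) ∈ pvForbiddenPairs
      · simp only [pvItemsLoopB, if_neg hs, if_pos hf0]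
        constructor
        · intro _
          refine ⟨k0, v0, hs, ?_, hf0⟩
          rw [PySem.Dict.get?_mk_cons]; simp
        · intro _; trivial
      · simp only [pvItemsLoopB, if_neg hs, if_neg hf0, ih]
        constructor
        · rintro ⟨k, v, hk, hget, hf⟩
          have hkseen : k ∉ seen := fun h => hk (List.mem_cons_of_mem _ h)
          have hne : k0 ≠ k := fun hEq => hk (by simp [hEq])
          refine ⟨k, v, hkseen, ?_, hf⟩
          rw [PySem.Dict.get?_mk_cons]
          simp [hne, hget]
        · rintro ⟨k, v, hk, hget, hf⟩
          rw [PySem.Dict.get?_mk_cons] at hget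
          by_cases hne : k0 = k
          · subst hne
            simp at hget
            subst hget
            exact absurd hf hf0
          · simp [hne] at hget
            refine ⟨k, v, ?_, hget, hf⟩
            intro hmem
            rcases List.mem_cons.1 hmem with rfl | h'
            · exact hne rfl
            · exact hk h'

-- forbidden-pair membership ↔ some table row matches
theorem pvForbidden_mem (k : String) (w : String) :
    (k, w) ∈ pvForbiddenPairs ↔ ∃ kv ∈ pvNonResTable, kv.1 = k ∧ w ∈ kv.2 := by
  have htab : pvNonResidentialB = pvNonResTable := rfl
  rw [pvForbiddenPairs, PySem.Set.mem_ofList, List.mem_flatMap, htab]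
  constructor
  · rintro ⟨kv, hkv, hmem⟩
    rcases List.mem_map.1 hmem with ⟨v, hv, hEq⟩
    cases hEq
    exact ⟨kv, hkv, rfl, hv⟩
  · rintro ⟨kv, hkv, rfl, hw⟩
    exact ⟨kv, hkv, List.mem_map.2 ⟨w, hw, rfl⟩⟩

-- A's guard loop returns the two labels only
theorem pvNonResLoop_cases (osm : List (String × String)) (t : List (String × List String)) :
    pvNonResLoop osm t = "not_residential_based_on_osm" ∨
    pvNonResLoop osm t = "probably_residential_complex" := by
  induction t with
  | nil => right; simp [pvNonResLoop, pvResLoop_const]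
  | cons kv rest ih =>
    obtain ⟨k, vals⟩ := kv
    cases h : PySem.Dict.get? (PySem.Dict.mk osm) k with
    | none => simpa only [pvNonResLoop, h] using ih
    | some v =>
      by_cases hv : PySem.Str.lower v ∈ vals
      · left; simp [pvNonResLoop, h, hv]
      · simpa only [pvNonResLoop, h, if_neg hv] using ih

-- ===== VERDICT (by name: the statement is the Claim_ definition above) =====
theorem classify_building_usage_from_osm_py_spec : Claim_equal_classify_building_usage_from_osm_py := by
  intro osm _
  show classify_building_usage_from_osm_py osm = classify_building_usage_from_osm_py_alt osm
  unfold classify_building_usage_from_osm_py classify_building_usage_from_osm_py_alt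
  have hiff : pvNonResLoop osm pvNonResTable = "not_residential_based_on_osm" ↔
      pvItemsLoopB [] osm = "not_residential_based_on_osm" := by
    rw [pvNonResLoop_iff, pvItemsLoopB_iff]
    constructor
    · rintro ⟨k, v, hget, hrow⟩
      exact ⟨k, v, List.not_mem_nil, hget, (pvForbidden_mem k _).2 hrow⟩
    · rintro ⟨k, v, _, hget, hf⟩
      exact ⟨k, v, hget, (pvForbidden_mem k _).1 hf⟩
  rcases pvNonResLoop_cases osm pvNonResTable with hA | hA
  · rw [hA, hiff.1 hA]
  · rcases pvItemsLoopB_cases osm [] with hB | hB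
    · have hA' := hiff.2 hB
      rw [hA] at hA'
      exact absurd hA' (by decide)
    · rw [hA, hB]
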